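-- pv_equiv track=rewrite | github.com/ankita-sethi/Coding-practice | Coding/min_variations.py | minimizeVariation
-- ===== SOURCE A (Python) =====
-- def minimizeVariation(productSize):
--     productSize.sort()
--     total = 0
--     min_so_far = productSize[0]
--     max_so_far = productSize[0]
--
--     for i in range(len(productSize)):
--         min_so_far = min(min_so_far, productSize[i])
--         max_so_far = max(max_so_far, productSize[i])
--         total += max_so_far - min_so_far
--
--     return total
-- ===== SOURCE B (Python) =====
-- def minimizeVariation(productSize):
--     productSize.sort()
--     return sum(productSize) - len(productSize) * productSize[0]
-- ===== Notes on version B (the rewrite author's own statement) =====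
-- stated objective: simpler
-- what changed: Replaces the min/max-tracking loop with the closed form sum(a) - len(a)*a[0] after sorting (prefix min is a[0], prefix max is a[i]).
import Mathlib
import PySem

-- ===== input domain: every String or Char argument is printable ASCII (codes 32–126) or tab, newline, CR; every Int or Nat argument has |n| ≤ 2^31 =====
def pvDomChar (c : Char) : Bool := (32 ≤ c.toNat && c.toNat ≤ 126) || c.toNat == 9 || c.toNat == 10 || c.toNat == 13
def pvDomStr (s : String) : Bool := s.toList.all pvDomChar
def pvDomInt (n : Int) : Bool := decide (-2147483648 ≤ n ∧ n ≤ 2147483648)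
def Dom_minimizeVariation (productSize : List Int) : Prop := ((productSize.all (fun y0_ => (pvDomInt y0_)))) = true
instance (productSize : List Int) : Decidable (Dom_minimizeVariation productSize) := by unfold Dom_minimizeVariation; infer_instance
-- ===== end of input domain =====

-- B replaces A's min/max-tracking loop with the closed form sum(s) - len(s)*s[0] after sorting (objective: simpler).
-- Both A and B sort productSize in place; the equivalence proved here is about the return value.
-- ===== PORT A =====
-- the loop: for each element (in order of the sorted list), update min/max and add (max - min)
def pvLoopA : List Int → Int → Int → Int → Int
  | [], total, _, _ => total
  | x :: xs, total, mn, mx => pvLoopA xs (total + (max mx x - min mn x)) (min mn x) (max mx x)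

def minimizeVariation (productSize : List Int) : Int :=
  let s := PySem.List.sorted productSize (fun x => x) false
  match s with
  | [] => 0  -- Python raises IndexError here (productSize[0]); excluded by Pre_
  | h :: _ => pvLoopA s 0 h h

-- ===== PORT B =====
def minimizeVariation_alt (productSize : List Int) : Int :=
  let s := PySem.List.sorted productSize (fun x => x) false
  match s with
  | [] => 0  -- Python raises IndexError here (productSize[0]); excluded by Pre_
  | h :: _ => s.sum - s.length * h

-- ===== PRECONDITION & SPEC =====
-- Pre_: the list is nonempty; on [] Python A (and B) raise IndexError at productSize[0].
def Pre_minimizeVariation (productSize : List Int) : Prop := productSize ≠ []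
instance (productSize : List Int) : Decidable (Pre_minimizeVariation productSize) := by unfold Pre_minimizeVariation; infer_instance
def pvWitness_minimizeVariation : List Int := [3, 1, 2]
def Spec_minimizeVariation (productSize : List Int) (out : Int) : Prop := out = minimizeVariation_alt productSize
instance (productSize : List Int) (out : Int) : Decidable (Spec_minimizeVariation productSize out) := by unfold Spec_minimizeVariation; infer_instance

-- ===== CLAIM (what is proved, stated in full; the proofs are below) =====
def Claim_equal_minimizeVariation : Prop := ∀ (productSize : List Int), Dom_minimizeVariation productSize → Pre_minimizeVariation productSize → Spec_minimizeVariation productSize (minimizeVariation productSize)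

-- ===== LEMMAS AND PROOFS =====

-- Loop invariant: if mn is ≤ everything in l and mx ≤ everything in l and l is sorted
-- (pairwise ≤), each step keeps min = mn and sets max to the current element, so the
-- loop adds ∑ (x - mn) over l.
theorem pvLoopA_sorted (l : List Int) (total mn mx : Int)
    (hmn : ∀ x ∈ l, mn ≤ x) (hmx : ∀ x ∈ l, mx ≤ x)
    (hs : l.Pairwise (· ≤ ·)) :
    pvLoopA l total mn mx = total + l.sum - l.length * mn := by
  induction l generalizing total mx with
  | nil => simp [pvLoopA]
  | cons x xs ih =>
    have hmnx : mn ≤ x := hmn x (by simp)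
    have hmxx : mx ≤ x := hmx x (by simp)
    have hpw := (List.pairwise_cons.mp hs)
    rw [pvLoopA, min_eq_left hmnx, max_eq_right hmxx,
      ih _ _ (fun y hy => hmn y (by simp [hy])) hpw.1 hpw.2]
    simp
    ring

-- ===== VERDICT (by name: the statement is the Claim_ definition above) =====
theorem minimizeVariation_spec : Claim_equal_minimizeVariation := by
  intro ps _ hpre
  unfold Spec_minimizeVariation minimizeVariation minimizeVariation_alt
  cases hsort : PySem.List.sorted ps (fun x => x) false with
  | nil => simp
  | cons h t =>
    have hhead : ∀ y ∈ ps, h ≤ y := PySem.List.key_head_sorted_le ps (fun x => x) hsort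
    have hmem : ∀ y ∈ h :: t, h ≤ y := by
      intro y hy
      exact hhead y ((PySem.List.mem_sorted (xs := ps) (key := fun x => x) (rev := false) (x := y)).mp (hsort ▸ hy))
    have hpw : (h :: t).Pairwise (· ≤ ·) := hsort ▸ PySem.List.sorted_pairwise (xs := ps) (key := fun x => x)
    simp only []
    rw [pvLoopA_sorted (h :: t) 0 h h hmem hmem hpw]
    ring
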